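-- pv_equiv track=rewrite | github.com/lordbobson/place_holder | GUI.py | construct_title_string
-- ===== SOURCE A (Python) =====
-- def construct_title_string(tuple_list):
--     """Constructs the title string for the plot based on input parameters."""
--
--     values_box = "|"
--     for i in range(1, len(tuple_list)):
--         value_add = "    " + tuple_list[i][0] + ": " + str(tuple_list[i][1]) + "   |"
--         if len(values_box.split('\n')[-1]) + len(value_add) > 50:
--             values_box += '\n|'
--         values_box += value_add
--     return values_box
-- ===== SOURCE B (Python) =====
-- def construct_title_string(tuple_list):
--     """Constructs the title string for the plot based on input parameters."""
--     chunks = ["    " + name + ": " + str(value) + "   |"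
--               for name, value in tuple_list[1:]]
--     lines = []
--     i, n = 0, len(chunks)
--     while True:
--         line, width = [], 1
--         if lines and i < n:
--             # a continuation line always starts with the chunk that overflowed
--             line.append(chunks[i])
--             width += len(chunks[i])
--             i += 1
--         while i < n and width + len(chunks[i]) <= 50:
--             line.append(chunks[i])
--             width += len(chunks[i])
--             i += 1
--         lines.append("|" + "".join(line))
--         if i >= n:
--             return "\n".join(lines)
-- ===== Notes on version B (the rewrite author's own statement) =====
-- stated objective: faster
-- what changed: B maps the tuples to chunk strings once, then builds the output line by line (each outer step greedily packs chunks into one line) and joins the lines once, instead of A's appending to one growing string and re-splitting it on every iteration; Pre_ excludes inputs where a name after the first entry contains a newline, an unspecified multi-line corner on which A's width measure (characters since the last newline of the accumulated text) and B's (whole chunks) are both defensible.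
import Mathlib
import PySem

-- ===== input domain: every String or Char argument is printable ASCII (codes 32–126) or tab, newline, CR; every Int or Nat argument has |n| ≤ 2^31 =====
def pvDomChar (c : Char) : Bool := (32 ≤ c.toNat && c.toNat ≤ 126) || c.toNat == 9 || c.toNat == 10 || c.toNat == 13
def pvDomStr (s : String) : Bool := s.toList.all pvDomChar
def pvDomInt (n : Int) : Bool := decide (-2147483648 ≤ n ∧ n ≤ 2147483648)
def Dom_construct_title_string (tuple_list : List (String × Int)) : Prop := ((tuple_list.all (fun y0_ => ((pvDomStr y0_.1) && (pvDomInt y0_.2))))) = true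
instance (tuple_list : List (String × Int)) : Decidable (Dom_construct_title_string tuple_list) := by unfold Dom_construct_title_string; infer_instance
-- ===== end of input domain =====

-- B first maps the tuples to their chunk strings, then packs the chunks line by line
-- (each outer step emits one whole output line) and joins the lines once — faster than
-- A's re-splitting of the ever-growing result string on every iteration.

-- ===== PORT A =====
-- loop body of A; `values_box.split('\n')[-1]`: split? is some (sep ≠ ""), the split of a
-- string is never empty so index -1 is in range (the .getD defaults are never taken)
def construct_title_string_step (values_box : String) (t : String × Int) : String :=
  let value_add := "    " ++ t.1 ++ ": " ++ PySem.Int.toStr t.2 ++ "   |"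
  let values_box :=
    if PySem.Str.len ((PySem.List.pyGet? ((PySem.Str.split? values_box "\n").getD []) (-1)).getD "")
        + PySem.Str.len value_add > 50
    then values_box ++ "\n|" else values_box
  values_box ++ value_add

-- `for i in range(1, len(tuple_list))` visiting tuple_list[i] = fold over tuple_list.drop 1
def construct_title_string (tuple_list : List (String × Int)) : String :=
  (tuple_list.drop 1).foldl construct_title_string_step "|"

-- ===== PORT B =====
-- Source B's inner `while` loop: greedily move chunks onto the current line while they fit
-- in width 50; returns (chunks taken for this line, remaining chunks)
def ctsTake : List String → Int → List String × List String
  | [], _ => ([], [])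
  | c :: cs, width =>
    if width + PySem.Str.len c ≤ 50 then
      let r := ctsTake cs (width + PySem.Str.len c)
      (c :: r.1, r.2)
    else ([], c :: cs)

-- needed by ctsCont's termination proof
theorem ctsTake_rest_length_le (cs : List String) (w : Int) :
    (ctsTake cs w).2.length ≤ cs.length := by
  induction cs generalizing w with
  | nil => simp [ctsTake]
  | cons c cs ih =>
    simp only [ctsTake]
    split
    · exact le_trans (ih _) (Nat.le_succ _)
    · simp

-- Source B's outer `while` loop after the first line: each continuation line starts with the
-- chunk that overflowed, then takes greedily; emits the rendered lines
def ctsCont : List String → List String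
  | [] => []
  | c :: cs =>
    let r := ctsTake cs (1 + PySem.Str.len c)
    ("|" ++ PySem.Str.join "" (c :: r.1)) :: ctsCont r.2
termination_by cs => cs.length
decreasing_by
  have := ctsTake_rest_length_le cs (1 + PySem.Str.len c)
  simpa using Nat.lt_succ_of_le this

def construct_title_string_alt (tuple_list : List (String × Int)) : String :=
  let chunks := (PySem.List.slice tuple_list (some 1) none).map
    (fun t => "    " ++ t.1 ++ ": " ++ PySem.Int.toStr t.2 ++ "   |")
  let f := ctsTake chunks 1
  PySem.Str.join "\n" (("|" ++ PySem.Str.join "" f.1) :: ctsCont f.2)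

-- ===== PRECONDITION & SPEC =====
-- Pre_ excludes inputs where a name after the first entry contains a newline: there the
-- width of the "current line" is ambiguous and A's measure (characters since the last
-- newline of the accumulated text) and B's (whole chunks) are both defensible readings
-- of this unspecified multi-line corner.
def Pre_construct_title_string (tuple_list : List (String × Int)) : Prop :=
  ∀ t ∈ tuple_list.drop 1, '\n' ∉ t.1.toList
instance (tuple_list : List (String × Int)) : Decidable (Pre_construct_title_string tuple_list) := by
  unfold Pre_construct_title_string; infer_instance

def pvWitness_construct_title_string : (List (String × Int)) := [("alpha", 1), ("beta", 22)]

def Spec_construct_title_string (tuple_list : List (String × Int)) (out : String) : Prop :=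
  out = construct_title_string_alt tuple_list
instance (tuple_list : List (String × Int)) (out : String) : Decidable (Spec_construct_title_string tuple_list out) := by
  unfold Spec_construct_title_string; infer_instance

-- ===== CLAIM =====
def Claim_equal_construct_title_string : Prop :=
  ∀ (tuple_list : List (String × Int)), Dom_construct_title_string tuple_list →
    Pre_construct_title_string tuple_list →
    Spec_construct_title_string tuple_list (construct_title_string tuple_list)

-- ===== LEMMAS AND PROOFS =====

-- reference model of Python's s.split('\n')
def mySplit : List Char → List (List Char)
  | [] => [[]]
  | c :: rest => if c = '\n' then [] :: mySplit rest else (mySplit rest).modifyHead (c :: ·)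

-- the text after the last newline (= last element of the split)
def lastSeg (l : List Char) : List Char := (l.reverse.takeWhile (fun c => c != '\n')).reverse

theorem mySplit_ne_nil (l : List Char) : mySplit l ≠ [] := by
  induction l with
  | nil => simp [mySplit]
  | cons c r ih =>
    simp only [mySplit]
    split_ifs
    · simp
    · rcases List.exists_cons_of_ne_nil ih with ⟨h, t, hh⟩
      simp [hh]

theorem go_eq (fuel : ℕ) : ∀ (l cur : List Char) (acc : List (List Char)), l.length ≤ fuel →
    PySem.Chars.splitOn.go ['\n'] fuel l cur acc
      = acc.reverse ++ (mySplit l).modifyHead (cur.reverse ++ ·) := by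
  induction fuel with
  | zero =>
    intro l cur acc h
    have : l = [] := by cases l <;> simp at h ⊢
    subst this
    simp [PySem.Chars.splitOn.go.eq_1, mySplit]
  | succ fuel ih =>
    intro l cur acc h
    cases l with
    | nil => simp [PySem.Chars.splitOn.go.eq_2, mySplit]
    | cons c rest =>
      rw [PySem.Chars.splitOn.go.eq_3]
      by_cases hc : c = '\n'
      · subst hc
        have hp : (['\n'] : List Char).isPrefixOf ('\n' :: rest) = true := by
          simp [List.isPrefixOf]
        rw [if_pos hp]
        simp only [List.length_cons, Nat.succ_le_succ_iff] at h
        rw [ih _ _ _ (by simpa using h)]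
        rcases List.exists_cons_of_ne_nil (mySplit_ne_nil rest) with ⟨a, t, ha⟩
        simp [mySplit, ha]
      · have hp : (['\n'] : List Char).isPrefixOf (c :: rest) = false := by
          simp [List.isPrefixOf]; exact fun hcc => absurd hcc.symm hc
        rw [if_neg (by simp [hp])]
        simp only [List.length_cons, Nat.succ_le_succ_iff] at h
        rw [ih _ _ _ h]
        rcases List.exists_cons_of_ne_nil (mySplit_ne_nil rest) with ⟨a, t, ha⟩
        simp [mySplit, hc, ha]

theorem splitOn_eq (l : List Char) : PySem.Chars.splitOn l ['\n'] = mySplit l := by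
  unfold PySem.Chars.splitOn
  rw [go_eq _ _ _ _ (Nat.le_succ _)]
  rcases List.exists_cons_of_ne_nil (mySplit_ne_nil l) with ⟨a, t, ha⟩
  simp [ha]

theorem lastSeg_append_not_mem (xs ys : List Char) (h : '\n' ∉ ys) :
    lastSeg (xs ++ ys) = lastSeg xs ++ ys := by
  have hall : List.takeWhile (fun c => c != '\n') ys.reverse = ys.reverse := by
    rw [List.takeWhile_eq_self_iff]
    intro a ha
    simp only [bne_iff_ne, ne_eq]
    intro hq; exact h (by simpa [hq] using (List.mem_reverse.mp ha))
  unfold lastSeg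
  rw [List.reverse_append, List.takeWhile_append, hall]
  simp

theorem lastSeg_append_mem (xs ys : List Char) (h : '\n' ∈ ys) :
    lastSeg (xs ++ ys) = lastSeg ys := by
  have hmem : '\n' ∈ ys.reverse := List.mem_reverse.mpr h
  have hlt : ¬ (List.takeWhile (fun c => c != '\n') ys.reverse).length = ys.reverse.length := by
    intro heq
    have hself : List.takeWhile (fun c => c != '\n') ys.reverse = ys.reverse :=
      (List.takeWhile_prefix _).eq_of_length heq
    have := List.mem_takeWhile_imp (hself ▸ hmem)
    simp at this
  unfold lastSeg
  rw [List.reverse_append, List.takeWhile_append, if_neg hlt]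

theorem lastSeg_of_not_mem (l : List Char) (h : '\n' ∉ l) : lastSeg l = l := by
  have := lastSeg_append_not_mem [] l h
  simpa [lastSeg] using this

theorem lastSeg_newline_cons (r : List Char) : lastSeg ('\n' :: r) = lastSeg r := by
  by_cases hm : '\n' ∈ r
  · exact lastSeg_append_mem ['\n'] r hm
  · have h1 := lastSeg_append_not_mem ['\n'] r hm
    have h2 := lastSeg_of_not_mem r hm
    simp only [List.singleton_append] at h1
    rw [h1, h2]
    simp [lastSeg]

theorem mySplit_two_of_mem (r : List Char) (h : '\n' ∈ r) :
    ∃ a b t, mySplit r = a :: b :: t := by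
  induction r with
  | nil => simp at h
  | cons c r ih =>
    by_cases hc : c = '\n'
    · subst hc
      rcases List.exists_cons_of_ne_nil (mySplit_ne_nil r) with ⟨a, t, ha⟩
      exact ⟨[], a, t, by simp [mySplit, ha]⟩
    · have hr : '\n' ∈ r := by
        rcases List.mem_cons.mp h with h' | h'
        · exact absurd h'.symm hc
        · exact h'
      rcases ih hr with ⟨a, b, t, ha⟩
      exact ⟨c :: a, b, t, by simp [mySplit, hc, ha]⟩

theorem mySplit_of_not_mem (l : List Char) (h : '\n' ∉ l) : mySplit l = [l] := by
  induction l with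
  | nil => rfl
  | cons c r ih =>
    have hc : c ≠ '\n' := fun hq => h (by simp [hq])
    have hr : '\n' ∉ r := fun hq => h (by simp [hq])
    simp [mySplit, hc, ih hr]

theorem mySplit_getLast? (l : List Char) : (mySplit l).getLast? = some (lastSeg l) := by
  induction l with
  | nil => simp [mySplit, lastSeg]
  | cons c r ih =>
    by_cases hc : c = '\n'
    · subst hc
      rcases List.exists_cons_of_ne_nil (mySplit_ne_nil r) with ⟨a, t, ha⟩
      rw [lastSeg_newline_cons]
      simp only [mySplit, if_pos]
      rw [ha] at ih ⊢
      simpa using ih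
    · by_cases hm : '\n' ∈ r
      · rcases mySplit_two_of_mem r hm with ⟨a, b, t, ha⟩
        have : lastSeg (c :: r) = lastSeg r := lastSeg_append_mem [c] r hm
        rw [this]
        rw [ha] at ih
        simp only [mySplit, if_neg hc, ha]
        simpa using ih
      · have h1 : lastSeg (c :: r) = lastSeg [c] ++ r := lastSeg_append_not_mem [c] r hm
        have h2 : lastSeg [c] = [c] := by simp [lastSeg, hc]
        simp [mySplit, hc, mySplit_of_not_mem r hm, h1, h2]

theorem pyGet?_neg_one {α : Type} (l : List α) (h : l ≠ []) :
    PySem.List.pyGet? l (-1) = l.getLast? := by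
  have hn : 1 ≤ l.length := List.length_pos_iff.mpr h
  simp only [PySem.List.pyGet?, PySem.List.pyIdx?]
  rw [if_neg (by norm_num), if_pos (by omega : -(l.length : Int) ≤ -1)]
  simp only [Option.bind_some]
  rw [List.getLast?_eq_getElem?]
  norm_num

theorem lastline_len (s : String) :
    PySem.Str.len ((PySem.List.pyGet? ((PySem.Str.split? s "\n").getD []) (-1)).getD "")
      = ((lastSeg s.toList).length : Int) := by
  have hsep : ("\n" : String).toList = ['\n'] := rfl
  rw [PySem.Str.split?.eq_1, PySem.Chars.split?.eq_1, hsep]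
  rw [if_neg (by simp)]
  rw [splitOn_eq]
  simp only [Option.map_some, Option.getD_some]
  have hne : (mySplit s.toList).map String.ofList ≠ [] := by
    simp [mySplit_ne_nil]
  rw [pyGet?_neg_one _ hne, List.getLast?_map, mySplit_getLast? s.toList]
  simp [PySem.Str.len]

-- str(n) contains no newline
theorem digitChar_ne_nl (n : Nat) (h : n < 10) : Nat.digitChar n ≠ '\n' := by
  interval_cases n <;> decide

theorem toDigitsCore_ne_nl (fuel n : Nat) : ∀ (ds : List Char), ('\n' ∉ ds) →
    '\n' ∉ Nat.toDigitsCore 10 fuel n ds := by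
  induction fuel generalizing n with
  | zero => intro ds h; simpa [Nat.toDigitsCore] using h
  | succ fuel ih =>
    intro ds h
    simp only [Nat.toDigitsCore]
    split
    · simp only [List.mem_cons, not_or]
      exact ⟨fun hq => digitChar_ne_nl (n % 10) (Nat.mod_lt _ (by norm_num)) hq.symm, h⟩
    · exact ih _ _ (by
        simp only [List.mem_cons, not_or]
        exact ⟨fun hq => digitChar_ne_nl (n % 10) (Nat.mod_lt _ (by norm_num)) hq.symm, h⟩)

theorem toChars_ne_nl (n : Int) : '\n' ∉ PySem.Int.toChars n := by
  unfold PySem.Int.toChars Nat.toDigits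
  split
  · simp only [List.mem_cons, not_or]
    exact ⟨by decide, toDigitsCore_ne_nl _ _ _ (by simp)⟩
  · exact toDigitsCore_ne_nl _ _ _ (by simp)

-- A's loop body on the chunk level
def stepC (s c : String) : String :=
  if PySem.Str.len ((PySem.List.pyGet? ((PySem.Str.split? s "\n").getD []) (-1)).getD "")
      + PySem.Str.len c > 50
  then s ++ "\n|" ++ c else s ++ c

def chunkOf (t : String × Int) : String :=
  "    " ++ t.1 ++ ": " ++ PySem.Int.toStr t.2 ++ "   |"

theorem foldA_eq (ts : List (String × Int)) (s : String) :
    ts.foldl construct_title_string_step s = (ts.map chunkOf).foldl stepC s := by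
  rw [List.foldl_map]
  apply PySem.List.foldl_congr_mem
  intro acc t _
  simp only [construct_title_string_step, stepC, chunkOf]
  split <;> rfl

-- "".join and "\n".join decompositions
theorem joinE_nil : PySem.Str.join "" ([] : List String) = "" := by
  rw [← String.toList_inj]; rfl

theorem joinE_cons (c : String) (L : List String) :
    PySem.Str.join "" (c :: L) = c ++ PySem.Str.join "" L := by
  rw [← String.toList_inj]
  cases L with
  | nil =>
    simp [PySem.Str.toList_join, PySem.Chars.join, List.intercalate]
  | cons b L =>
    simp [PySem.Str.toList_join, PySem.Chars.join_cons_cons]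

-- '\n'.join(a :: L) = a ++ concat of '\n'-prefixed lines
def rendL : List String → String
  | [] => ""
  | l :: ls => "\n" ++ l ++ rendL ls

theorem joinNL (a : String) (L : List String) :
    PySem.Str.join "\n" (a :: L) = a ++ rendL L := by
  induction L generalizing a with
  | nil =>
    rw [← String.toList_inj]
    simp [PySem.Str.toList_join, PySem.Chars.join_singleton, rendL]
  | cons b L ih =>
    rw [← String.toList_inj]
    have ihb := congrArg String.toList (ih b)
    simp only [PySem.Str.toList_join, List.map_cons, String.toList_append] at ihb
    simp only [PySem.Str.toList_join, List.map_cons, PySem.Chars.join_cons_cons]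
    rw [ihb]
    simp [rendL, show ("\n" : String).toList = ['\n'] from rfl]

theorem lastSeg_append_str (s c : String) (h : '\n' ∉ c.toList) :
    lastSeg (s ++ c).toList = lastSeg s.toList ++ c.toList := by
  rw [String.toList_append]
  exact lastSeg_append_not_mem _ _ h

theorem lastSeg_break (s c : String) (h : '\n' ∉ c.toList) :
    lastSeg (s ++ "\n|" ++ c).toList = '|' :: c.toList := by
  rw [String.toList_append, String.toList_append]
  rw [show ("\n|" : String).toList = ['\n', '|'] from rfl]
  rw [List.append_assoc]
  rw [lastSeg_append_mem _ _ (by simp)]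
  have he : (['\n', '|'] ++ c.toList) = '\n' :: ('|' :: c.toList) := rfl
  rw [he, lastSeg_newline_cons]
  refine lastSeg_of_not_mem _ ?_
  intro hx
  rcases List.mem_cons.mp hx with h1 | h1
  · exact absurd h1 (by decide)
  · exact h h1

-- main invariant: A's fold from a state whose last line has width w equals the state
-- followed by B's packing of the remaining chunks starting from width w
theorem packInv (cs : List String) (h : ∀ c ∈ cs, '\n' ∉ c.toList) :
    ∀ (s : String) (w : Int), w = ((lastSeg s.toList).length : Int) →
    cs.foldl stepC s
      = s ++ PySem.Str.join "" (ctsTake cs w).1 ++ rendL (ctsCont (ctsTake cs w).2) := by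
  induction cs with
  | nil => intro s w _; simp [ctsTake, ctsCont, rendL, joinE_nil]
  | cons c cs ih =>
    intro s w hw
    have hc : '\n' ∉ c.toList := h c (by simp)
    have hcs : ∀ x ∈ cs, '\n' ∉ x.toList := fun x hx => h x (by simp [hx])
    have hcond : PySem.Str.len ((PySem.List.pyGet? ((PySem.Str.split? s "\n").getD []) (-1)).getD "")
        + PySem.Str.len c = w + PySem.Str.len c := by
      rw [lastline_len, hw]
    by_cases hfit : w + PySem.Str.len c ≤ 50
    · have hstep : stepC s c = s ++ c := by
        unfold stepC; rw [hcond, if_neg (by omega)]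
      have hw' : w + PySem.Str.len c = ((lastSeg (s ++ c).toList).length : Int) := by
        rw [lastSeg_append_str s c hc, hw]
        simp [PySem.Str.len_eq]
      simp only [List.foldl_cons, hstep]
      rw [ih hcs (s ++ c) _ hw']
      simp only [ctsTake, if_pos hfit]
      rw [joinE_cons]
      simp [String.append_assoc]
    · have hstep : stepC s c = s ++ "\n|" ++ c := by
        unfold stepC; rw [hcond, if_pos (by omega)]
      have hw' : 1 + PySem.Str.len c = ((lastSeg (s ++ "\n|" ++ c).toList).length : Int) := by
        rw [lastSeg_break s c hc]
        simp [PySem.Str.len_eq]; omega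
      simp only [List.foldl_cons, hstep]
      rw [ih hcs (s ++ "\n|" ++ c) _ hw']
      simp only [ctsTake, if_neg hfit]
      rw [ctsCont]
      simp only [rendL, joinE_nil, joinE_cons]
      rw [← String.toList_inj]
      simp only [String.toList_append, show ("\n|" : String).toList = ['\n', '|'] from rfl,
        show ("\n" : String).toList = ['\n'] from rfl,
        show ("|" : String).toList = ['|'] from rfl, List.append_assoc]
      rfl

-- ===== VERDICT (by name: the statement is the Claim_ definition above) =====
theorem construct_title_string_spec : Claim_equal_construct_title_string := by
  unfold Claim_equal_construct_title_string Spec_construct_title_string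
  intro ts _ hpre
  unfold construct_title_string construct_title_string_alt
  rw [PySem.List.slice_from ts (by norm_num), Int.toNat_one]
  have hchunks : ∀ c ∈ (ts.drop 1).map chunkOf, '\n' ∉ c.toList := by
    intro c hcmem
    rcases List.mem_map.mp hcmem with ⟨t, ht, rfl⟩
    have hname : '\n' ∉ t.1.toList := hpre t ht
    unfold chunkOf
    simp only [String.toList_append, List.mem_append, not_or]
    refine ⟨⟨⟨⟨by decide, hname⟩, by decide⟩, ?_⟩, by decide⟩
    rw [PySem.Int.toList_toStr]
    exact toChars_ne_nl t.2
  rw [foldA_eq]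
  have h1 : (1 : Int) = ((lastSeg ("|" : String).toList).length : Int) := by decide
  rw [packInv ((ts.drop 1).map chunkOf) hchunks "|" 1 h1]
  show _ = PySem.Str.join "\n" _
  rw [joinNL]
  have : ((ts.drop 1).map (fun t => "    " ++ t.1 ++ ": " ++ PySem.Int.toStr t.2 ++ "   |"))
      = (ts.drop 1).map chunkOf := rfl
  rw [this]
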